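-- pv_equiv track=rewrite | github.com/Joshuashen022/nebula-crawler-analysis | src/analysis/compromized_peer_metadata.py | _build_agent_map
-- ===== SOURCE A (Python) =====
-- from typing import Dict, Iterable, Optional, Tuple
--
-- def _build_agent_map(rows: Iterable[Tuple[str, str]]) -> Dict[str, str]:
--     """
--     rows: (agent_version, peerId)
--     """
--     out: Dict[str, str] = {}
--     for agent_version, peer_id in rows:
--         if not peer_id:
--             continue
--         # If duplicates exist, keep the first non-empty agent version.
--         if peer_id not in out and agent_version:
--             out[peer_id] = agent_version
--     return out
-- ===== SOURCE B (Python) =====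
-- from typing import Dict, Iterable, Tuple
--
-- def _build_agent_map(rows: Iterable[Tuple[str, str]]) -> Dict[str, str]:
--     """
--     rows: (agent_version, peerId)
--     """
--     # Keep only usable rows, flipped to (peer_id, agent_version).
--     valid = [(peer_id, agent_version) for agent_version, peer_id in rows
--              if peer_id and agent_version]
--     # Last write wins in a dict, so building from the reversed list leaves
--     # each key bound to its FIRST agent_version — no membership test needed.
--     rev = dict(reversed(valid))
--     # Re-insert in forward order so keys appear in first-occurrence order.
--     return {peer_id: rev[peer_id] for peer_id, _ in valid}
-- ===== Notes on version B (the rewrite author's own statement) =====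
-- stated objective: alternative
-- what changed: Replaces the single guarded loop with a per-key membership test by a three-phase pipeline: filter-and-flip the usable rows, build a last-write-wins dict from the reversed list (so the first agent_version survives with no 'not in' test), then re-insert in forward order to restore first-occurrence key order.
import Mathlib
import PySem

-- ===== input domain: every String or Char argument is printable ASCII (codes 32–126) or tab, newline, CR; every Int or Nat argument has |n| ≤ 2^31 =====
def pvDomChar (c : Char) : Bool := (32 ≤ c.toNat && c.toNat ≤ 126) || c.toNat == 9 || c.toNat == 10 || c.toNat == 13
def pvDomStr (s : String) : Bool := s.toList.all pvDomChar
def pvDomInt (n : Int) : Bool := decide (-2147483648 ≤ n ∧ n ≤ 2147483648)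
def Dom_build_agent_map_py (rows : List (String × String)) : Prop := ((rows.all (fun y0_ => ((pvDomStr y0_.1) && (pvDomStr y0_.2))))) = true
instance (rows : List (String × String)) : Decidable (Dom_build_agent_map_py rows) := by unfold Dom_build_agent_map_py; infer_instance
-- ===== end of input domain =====

-- B replaces A's guarded single loop (with a membership test) by filter+flip, a reversed
-- last-write-wins dict build, then a forward re-insertion pass; alternative decomposition, same cost.

-- ===== PORT A =====
-- Single pass: skip empty peer_id; insert only when the key is new and agent_version is non-empty.
def build_agent_map_py (rows : List (String × String)) : List (String × String) :=
  (rows.foldl (fun (out : PySem.Dict String String) r =>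
      if r.2 = "" then out
      else if out.contains r.2 = false ∧ r.1 ≠ "" then out.insert r.2 r.1
      else out)
    PySem.Dict.empty).items

-- ===== PORT B =====
-- B: filter+flip the usable rows, build a last-write-wins dict from the reversed list,
-- then re-insert forward in first-occurrence order. rev[p] in Source B cannot raise KeyError
-- (every key of `valid` is a key of `rev`), so the lookup is ported as get? with a dummy default.
def build_agent_map_py_alt (rows : List (String × String)) : List (String × String) :=
  let valid := (rows.filter (fun r => decide (r.2 ≠ "" ∧ r.1 ≠ ""))).map (fun r => (r.2, r.1))
  let rev := valid.reverse.foldl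
      (fun (d : PySem.Dict String String) p => d.insert p.1 p.2) PySem.Dict.empty
  (valid.foldl
      (fun (d : PySem.Dict String String) p => d.insert p.1 ((rev.get? p.1).getD ""))
      PySem.Dict.empty).items

-- ===== PRECONDITION & SPEC =====
def Spec_build_agent_map_py (rows : List (String × String)) (out : List (String × String)) : Prop := out = build_agent_map_py_alt rows
instance (rows : List (String × String)) (out : List (String × String)) : Decidable (Spec_build_agent_map_py rows out) := by unfold Spec_build_agent_map_py; infer_instance

-- ===== CLAIM (what is proved, stated in full; the proofs are below) =====
def Claim_equal_build_agent_map_py : Prop := ∀ (rows : List (String × String)), Dom_build_agent_map_py rows → Spec_build_agent_map_py rows (build_agent_map_py rows)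

-- ===== LEMMAS AND PROOFS =====

def pvFirst (l : List (String × String)) (p : String) : Option String :=
  (l.find? (fun q => q.1 == p)).map Prod.snd

lemma pv_get_fold_insert :
    ∀ (l : List (String × String)) (d : PySem.Dict String String) (p : String),
    (l.foldl (fun d q => d.insert q.1 q.2) d).get? p
      = (pvFirst l.reverse p).or (d.get? p) := by
  intro l
  induction l with
  | nil => intro d p; simp [pvFirst]
  | cons q t ih =>
    intro d p
    simp only [List.foldl_cons, ih, List.reverse_cons, pvFirst, List.find?_append]
    rcases h : t.reverse.find? (fun r => r.1 == p) with _ | r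
    · simp only [h, Option.none_or, Option.map_none]
      rw [PySem.Dict.get?_insert]
      by_cases hp : p = q.1
      · simp [List.find?, hp]
      · have hb : (q.1 == p) = false := by simpa using Ne.symm hp
        simp [List.find?, hb, hp]
    · simp [h]

lemma pv_insert_eq_self (d : PySem.Dict String String) (k v : String)
    (hnd : d.keys.Nodup) (h : d.get? k = some v) : d.insert k v = d := by
  apply PySem.Dict.ext
  have hc : d.contains k = true := by
    rw [PySem.Dict.contains_eq_isSome_get?, h]; rfl
  rw [PySem.Dict.items_insert_of_contains _ v hc]
  have hmap : ∀ q ∈ d.items, (if (q.1 == k) = true then (k, v) else q) = q := by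
    intro q hq
    by_cases hqk : q.1 = k
    · have h2 := PySem.Dict.get?_of_mem_items (d := d) (k := q.1) (v := q.2) (by simpa using hq) hnd
      rw [hqk, h] at h2
      have hv : q.2 = v := by simpa using h2.symm
      have : q = (k, v) := by rw [← hqk, ← hv]
      simp [this]
    · simp [hqk]
  rw [List.map_congr_left hmap]; simp


-- A's loop over rows = the "insert first occurrence" fold over the filtered, flipped rows
lemma pv_A_eq_firstFold :
    ∀ (rows : List (String × String)) (d : PySem.Dict String String),
    rows.foldl (fun out r =>
        if r.2 = "" then out
        else if out.contains r.2 = false ∧ r.1 ≠ "" then out.insert r.2 r.1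
        else out) d
      = ((rows.filter (fun r => decide (r.2 ≠ "" ∧ r.1 ≠ ""))).map (fun r => (r.2, r.1))).foldl
          (fun d q => if d.contains q.1 then d else d.insert q.1 q.2) d := by
  intro rows
  induction rows with
  | nil => intro d; simp
  | cons r t ih =>
    intro d
    by_cases h2 : r.2 = ""
    · simp [h2, ih]
    · by_cases h1 : r.1 = ""
      · simp [h2, h1, ih]
      · by_cases hc : d.contains r.2
        · simp [h2, h1, hc, ih]
        · simp [h2, h1, hc, ih]

-- the comprehension fold (unconditional insert of g-values) = the firstFold,
-- under the invariant relating d's contents to g and to first matches in the remainder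
lemma pv_comp_eq_firstFold (g : String → Option String) :
    ∀ (l : List (String × String)) (d : PySem.Dict String String),
    d.keys.Nodup →
    (∀ q ∈ l, (d.contains q.1 = true → d.get? q.1 = g q.1) ∧
              (d.contains q.1 = false → g q.1 = pvFirst l q.1)) →
    l.foldl (fun d q => d.insert q.1 ((g q.1).getD "")) d
      = l.foldl (fun d q => if d.contains q.1 then d else d.insert q.1 q.2) d := by
  intro l
  induction l with
  | nil => intro d _ _; rfl
  | cons q t ih =>
    intro d hnd hinv
    obtain ⟨hin, hout⟩ := hinv q (List.mem_cons_self)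
    by_cases hc : d.contains q.1
    · -- key already present: inserting the value it already holds is a no-op
      have hg : d.get? q.1 = g q.1 := hin hc
      obtain ⟨v, hv⟩ : ∃ v, d.get? q.1 = some v := by
        have := PySem.Dict.contains_eq_isSome_get? d q.1
        rw [hc] at this
        exact Option.isSome_iff_exists.mp this.symm
      have hgv : g q.1 = some v := by rw [← hg, hv]
      rw [List.foldl_cons, List.foldl_cons, if_pos hc, hgv, Option.getD_some,
          pv_insert_eq_self d q.1 v hnd hv]
      apply ih d hnd
      intro r hr
      refine ⟨(hinv r (List.mem_cons_of_mem _ hr)).1, ?_⟩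
      intro hcr
      have hne : (q.1 == r.1) = false := by
        simp only [beq_eq_false_iff_ne]
        intro he; rw [← he, hc] at hcr; cases hcr
      have := (hinv r (List.mem_cons_of_mem _ hr)).2 hcr
      rw [this]
      simp [pvFirst, List.find?, hne]
    · -- new key: g q.1 is exactly the current value
      have hg : g q.1 = some q.2 := by
        have := hout (by simpa using hc)
        rw [this]
        simp [pvFirst, List.find?]
      rw [List.foldl_cons, List.foldl_cons, if_neg hc, hg, Option.getD_some]
      have hnd' : (d.insert q.1 q.2).keys.Nodup :=
        PySem.Dict.nodup_keys_insert d q.1 q.2 hnd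
      apply ih _ hnd'
      intro r hr
      constructor
      · intro hcr
        by_cases hrq : r.1 = q.1
        · rw [hrq, PySem.Dict.get?_insert_self, hg]
        · rw [PySem.Dict.get?_insert_of_ne _ _ hrq]
          apply (hinv r (List.mem_cons_of_mem _ hr)).1
          rw [PySem.Dict.contains_insert] at hcr
          simpa [hrq] using hcr
      · intro hcr
        rw [PySem.Dict.contains_insert] at hcr
        have hrq : (r.1 == q.1) = false := by
          cases h : (r.1 == q.1) <;> simp [h] at hcr ⊢
        have hdc : d.contains r.1 = false := by
          cases h : (r.1 == q.1) <;> simp [h] at hcr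
          exact hcr
        have hne : (q.1 == r.1) = false := by
          simp only [beq_eq_false_iff_ne]
          intro he
          rw [← he] at hrq
          simp at hrq
        have := (hinv r (List.mem_cons_of_mem _ hr)).2 hdc
        rw [this]
        simp [pvFirst, List.find?, hne]

-- get? of the reversed-list dict = first match in the forward list
lemma pv_rev_get (valid : List (String × String)) (p : String) :
    (valid.reverse.foldl (fun (d : PySem.Dict String String) q => d.insert q.1 q.2)
      PySem.Dict.empty).get? p = pvFirst valid p := by
  rw [pv_get_fold_insert, List.reverse_reverse, PySem.Dict.get?_empty, Option.or_none]

-- ===== VERDICT (by name: the statement is the Claim_ definition above) =====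
theorem build_agent_map_py_spec : Claim_equal_build_agent_map_py := by
  intro rows _
  show build_agent_map_py rows = build_agent_map_py_alt rows
  unfold build_agent_map_py build_agent_map_py_alt
  congr 1
  rw [pv_A_eq_firstFold]
  refine (pv_comp_eq_firstFold _ _ _ PySem.Dict.nodup_keys_empty ?_).symm
  intro q hq
  constructor
  · intro h
    rw [PySem.Dict.contains_empty] at h
    cases h
  · intro _
    exact pv_rev_get _ q.1
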